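-- pv_equiv track=rewrite | github.com/mamc0826/GPEdit | CIDtool.py | format_logon_hours
-- ===== SOURCE A (Python) =====
-- def format_logon_hours(selected_hours):
--     """Formats the selected hours into the 'net user /times' string format."""
--     # Example: "M-F,8am-5pm;Sa,9am-12pm"
--     formatted_parts = []
--     days_map = {"M": 0, "Tu": 1, "W": 2, "Th": 3, "F": 4, "Sa": 5, "Su": 6}
--     inverse_days_map = {v: k for k, v in days_map.items()}
--
--     # Sort days for consistent output
--     sorted_days = sorted(selected_hours.keys(), key=lambda d: days_map[d])
--
--     for day in sorted_days:
--         hours_list = sorted(list(set(selected_hours[day]))) # Remove duplicates and sort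
--         if not hours_list:
--             continue
--
--         # Group consecutive hours
--         ranges = []
--         if hours_list:
--             start = hours_list[0]
--             end = hours_list[0]
--             for i in range(1, len(hours_list)):
--                 if hours_list[i] == end + 1:
--                     end = hours_list[i]
--                 else:
--                     ranges.append((start, end))
--                     start = hours_list[i]
--                     end = hours_list[i]
--             ranges.append((start, end)) # Add the last range
--
--         day_parts = []
--         for start_hour, end_hour in ranges:
--             # Convert 24-hour to 12-hour format with am/pm
--             def format_hour(h):
--                 if h == 0: return "12am"
--                 if h == 12: return "12pm"
--                 if h < 12: return f"{h}am"
--                 return f"{h-12}pm"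
--
--             # net user /times uses 24-hour format for ranges
--             # M,8-17;Tu,8-17
--             # Or M-F,8-17
--             day_parts.append(f"{start_hour}-{end_hour + 1}") # End hour is exclusive in net user
--
--         formatted_parts.append(f"{day},{','.join(day_parts)}")
--
--     if not formatted_parts:
--         return "All" # If no hours selected, allow all
--
--     # Attempt to consolidate day ranges (e.g., M,8-17;Tu,8-17 -> M-Tu,8-17)
--     final_parts = []
--     i = 0
--     while i < len(formatted_parts):
--         current_day_str, current_hours_str = formatted_parts[i].split(',', 1)
--         current_day_abbr = current_day_str
--         current_day_index = days_map[current_day_abbr]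
--
--         j = i + 1
--         while j < len(formatted_parts):
--             next_day_str, next_hours_str = formatted_parts[j].split(',', 1)
--             next_day_abbr = next_day_str
--             next_day_index = days_map[next_day_abbr]
--
--             if next_day_index == current_day_index + 1 and next_hours_str == current_hours_str:
--                 current_day_index = next_day_index
--                 j += 1
--             else:
--                 break
--
--         if i == j - 1: # No consolidation
--             final_parts.append(formatted_parts[i])
--         else:
--             start_day_abbr = formatted_parts[i].split(',')[0]
--             end_day_abbr = formatted_parts[j-1].split(',')[0]
--             final_parts.append(f"{start_day_abbr}-{end_day_abbr},{current_hours_str}")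
--         i = j
--
--     return ";".join(final_parts)
-- ===== SOURCE B (Python) =====
-- def format_logon_hours(selected_hours):
--     """Formats the selected hours into the 'net user /times' string format."""
--     days = ["M", "Tu", "W", "Th", "F", "Sa", "Su"]
--
--     def hour_str(hs):
--         # ranges by neighbour membership: an hour opens a range iff h-1 is not
--         # selected and closes one iff h+1 is not selected; zip pairs them up
--         s = set(hs)
--         starts = sorted(h for h in s if h - 1 not in s)
--         ends = sorted(h for h in s if h + 1 not in s)
--         return ",".join("%d-%d" % (a, b + 1) for a, b in zip(starts, ends))
--
--     # fixed 7-slot table of per-day hour strings (None = day absent or empty)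
--     slot = [None] * 7
--     for abbr, hours in selected_hours.items():
--         i = days.index(abbr)
--         if hours:
--             slot[i] = hour_str(hours)
--
--     if all(x is None for x in slot):
--         return "All"  # if no hours selected, allow all
--
--     # day groups by the same boundary trick on the slot table
--     gstarts = [d for d in range(7) if slot[d] is not None and (d == 0 or slot[d] != slot[d - 1])]
--     gends = [d for d in range(7) if slot[d] is not None and (d == 6 or slot[d] != slot[d + 1])]
--     return ";".join(
--         (days[a] if a == b else days[a] + "-" + days[b]) + "," + slot[a]
--         for a, b in zip(gstarts, gends)
--     )
-- ===== Notes on version B (the rewrite author's own statement) =====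
-- stated objective: alternative
-- what changed: B computes each day's hour ranges without a run-building state machine - an hour opens a range iff h-1 is not in the selected set and closes one iff h+1 is not, and zipping the sorted opener/closer lists yields the ranges - and consolidates days on a fixed 7-slot table of per-day hour strings by the same boundary trick (a day starts/ends a group iff its neighbour slot differs), instead of A's sort-then-extend hour loop and its nested while loops that re-parse pre-joined 'day,hours' strings with split.
import Mathlib
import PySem

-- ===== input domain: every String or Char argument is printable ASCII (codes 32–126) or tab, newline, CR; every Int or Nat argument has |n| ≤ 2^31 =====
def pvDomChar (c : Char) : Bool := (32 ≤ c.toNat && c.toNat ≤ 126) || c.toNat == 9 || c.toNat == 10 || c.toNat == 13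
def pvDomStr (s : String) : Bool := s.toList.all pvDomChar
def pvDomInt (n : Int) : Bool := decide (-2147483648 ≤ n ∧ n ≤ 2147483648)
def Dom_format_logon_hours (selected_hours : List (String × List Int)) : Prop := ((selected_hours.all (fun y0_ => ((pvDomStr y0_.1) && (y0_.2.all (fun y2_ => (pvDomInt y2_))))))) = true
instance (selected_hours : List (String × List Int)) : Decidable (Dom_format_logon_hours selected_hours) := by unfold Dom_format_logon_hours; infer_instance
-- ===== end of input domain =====

-- B finds each day's hour ranges by neighbour membership in the selected set (an hour opens a
-- range iff h-1 is unselected, closes one iff h+1 is, zip pairs them) and consolidates days on a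
-- fixed 7-slot table by the same boundary trick, instead of A's sort-then-extend state machine
-- and its nested while loops re-parsing pre-joined strings. Equality of RETURN values is proved.

-- ===== PORT A =====
def pvDaysMap : PySem.Dict String Int :=
  PySem.Dict.ofList [("M", 0), ("Tu", 1), ("W", 2), ("Th", 3), ("F", 4), ("Sa", 5), ("Su", 6)]

-- A's inner `for i in range(1, len(hours_list))` with state (ranges, start, end)
def pvRangesLoop : List Int → List (Int × Int) → Int → Int → List (Int × Int)
  | [], ranges, start, e => ranges ++ [(start, e)]
  | x :: rest, ranges, start, e =>
    if x = e + 1 then pvRangesLoop rest ranges start x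
    else pvRangesLoop rest (ranges ++ [(start, e)]) x x

-- s.split(',', 1) unpacked into two names (every part A builds contains a comma, so the
-- fallback arm is never reached on A's inputs)
def pvSplit1 (s : String) : String × String :=
  match PySem.Str.splitMax? s "," 1 with
  | some (a :: b :: _) => (a, b)
  | _ => (s, "")

-- s.split(',')[0]
def pvSplitHead (s : String) : String :=
  match PySem.Str.split? s "," with
  | some parts => PySem.List.pyGetD parts 0 ""
  | none => ""   -- not reached: the separator "," is nonempty

-- A's inner `while j < len(formatted_parts)` scan: returns (j - i - 1, formatted_parts[j-1])
def pvConsolidateScan : Int → String → String → List String → Nat × String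
  | _, _, last, [] => (0, last)
  | cur_index, cur_hours, last, q :: qs =>
    let nd := pvSplit1 q
    let next_index := pvDaysMap.getD nd.1 0
    if next_index = cur_index + 1 ∧ nd.2 = cur_hours then
      let r := pvConsolidateScan next_index cur_hours q qs
      (r.1 + 1, r.2)
    else (0, last)

-- A's outer `while i < len(formatted_parts)` loop, as recursion on the remaining suffix
def pvConsolidate : List String → List String
  | [] => []
  | p :: rest =>
    let ch := pvSplit1 p
    let r := pvConsolidateScan (pvDaysMap.getD ch.1 0) ch.2 p rest
    if r.1 = 0 then p :: pvConsolidate rest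
    else (pvSplitHead p ++ "-" ++ pvSplitHead r.2 ++ "," ++ ch.2) :: pvConsolidate (rest.drop r.1)
termination_by l => l.length
decreasing_by
  all_goals simp

def format_logon_hours (selected_hours : List (String × List Int)) : String :=
  let days_map := pvDaysMap
  -- A also builds inverse_days_map and a nested format_hour; both are dead code and elided
  let d := PySem.Dict.ofList selected_hours   -- the Python argument is this dict
  -- days_map[day] raises KeyError outside the seven abbreviations; Pre_ excludes that, so the
  -- default 0 below is never read
  let sorted_days := PySem.List.sorted d.keys (fun k => days_map.getD k 0)
  let formatted_parts := sorted_days.foldl (fun acc day =>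
      match PySem.List.sorted (PySem.Set.ofList (d.getD day [])) (fun x => x) with
      | [] => acc   -- continue
      | h0 :: rest =>
        acc ++ [day ++ "," ++ PySem.Str.join ","
          ((pvRangesLoop rest [] h0 h0).foldl
            (fun dp r => dp ++ [PySem.Int.toStr r.1 ++ "-" ++ PySem.Int.toStr (r.2 + 1)]) [])]) []
  if formatted_parts = [] then "All"
  else PySem.Str.join ";" (pvConsolidate formatted_parts)

-- ===== PORT B =====
def pvDays : List String := ["M", "Tu", "W", "Th", "F", "Sa", "Su"]

-- B's hour_str: range openers/closers by neighbour membership, paired by zip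
def pvHourStr (hs : List Int) : String :=
  let s := PySem.Set.ofList hs
  let starts := PySem.List.sorted (s.filter (fun h => !(PySem.Set.contains s (h - 1)))) (fun x => x)
  let ends := PySem.List.sorted (s.filter (fun h => !(PySem.Set.contains s (h + 1)))) (fun x => x)
  PySem.Str.join "," ((starts.zip ends).map (fun p => PySem.Int.toStr p.1 ++ "-" ++ PySem.Int.toStr (p.2 + 1)))

def format_logon_hours_alt (selected_hours : List (String × List Int)) : String :=
  let d := PySem.Dict.ofList selected_hours
  let slot := d.items.foldl (fun sl kv =>
    -- i = days.index(abbr): ValueError outside the seven abbreviations; Pre_ excludes that,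
    -- so the default 0 below is never read
    let i : Int := ((PySem.List.index? pvDays kv.1).getD 0 : Int)
    if kv.2 ≠ [] then PySem.List.pySetD sl i (some (pvHourStr kv.2)) else sl)
    (List.replicate 7 (none : Option String))
  if slot.all (fun x => decide (x = none)) then "All"
  else
    -- `d == 0 or …` / `d == 6 or …` short-circuit in Python, so the out-of-range neighbour
    -- lookups below are never read there; the disjunction's truth value is identical
    let gstarts := (PySem.List.pyRange 0 7 1).filter (fun i => decide
      (PySem.List.pyGetD slot i none ≠ none ∧
        (i = 0 ∨ PySem.List.pyGetD slot i none ≠ PySem.List.pyGetD slot (i - 1) none)))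
    let gends := (PySem.List.pyRange 0 7 1).filter (fun i => decide
      (PySem.List.pyGetD slot i none ≠ none ∧
        (i = 6 ∨ PySem.List.pyGetD slot i none ≠ PySem.List.pyGetD slot (i + 1) none)))
    PySem.Str.join ";" ((gstarts.zip gends).map (fun p =>
      (if p.1 = p.2 then PySem.List.pyGetD pvDays p.1 ""
       else PySem.List.pyGetD pvDays p.1 "" ++ "-" ++ PySem.List.pyGetD pvDays p.2 "")
      ++ "," ++ (PySem.List.pyGetD slot p.1 none).getD ""))

-- ===== PRECONDITION & SPEC =====
-- Pre_ excludes exactly the dicts with a key outside the seven day abbreviations: on those the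
-- Python A raises KeyError (days_map[day]) and returns nothing.
def Pre_format_logon_hours (selected_hours : List (String × List Int)) : Prop :=
  ∀ p ∈ selected_hours, p.1 ∈ pvDays
instance (selected_hours : List (String × List Int)) : Decidable (Pre_format_logon_hours selected_hours) := by
  unfold Pre_format_logon_hours; infer_instance

def pvWitness_format_logon_hours : (List (String × List Int)) :=
  [("M", [8, 9, 10, 14]), ("Tu", [9, 8, 8]), ("Sa", [])]

def Spec_format_logon_hours (selected_hours : List (String × List Int)) (out : String) : Prop :=
  out = format_logon_hours_alt selected_hours
instance (selected_hours : List (String × List Int)) (out : String) : Decidable (Spec_format_logon_hours selected_hours out) := by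
  unfold Spec_format_logon_hours; infer_instance

-- ===== CLAIM (what is proved, stated in full; the proofs are below) =====
def Claim_equal_format_logon_hours : Prop := ∀ (selected_hours : List (String × List Int)), Dom_format_logon_hours selected_hours → Pre_format_logon_hours selected_hours → Spec_format_logon_hours selected_hours (format_logon_hours selected_hours)

-- ===== LEMMAS AND PROOFS =====

-- proof-side canonical forms ------------------------------------------------

-- the hour string A and B both compute for a day (none = day skipped)
def hoursStr (d : PySem.Dict String (List Int)) (day : String) : Option String :=
  match PySem.List.sorted (PySem.Set.ofList (d.getD day [])) (fun x => x) with
  | [] => none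
  | h0 :: rest => some (PySem.Str.join ","
      ((pvRangesLoop rest [] h0 h0).map (fun r => PySem.Int.toStr r.1 ++ "-" ++ PySem.Int.toStr (r.2 + 1))))

def abbrOf (i : Int) : String := PySem.List.pyGetD pvDays i ""

def render (e : Int × String) : String := abbrOf e.1 ++ "," ++ e.2

def lineOpt (l : List (String × List Int)) (day : String) : Option String :=
  (hoursStr (PySem.Dict.ofList l) day).map (fun s => day ++ "," ++ s)

def entryOptK (l : List (String × List Int)) (day : String) : Option (Int × String) :=
  (hoursStr (PySem.Dict.ofList l) day).map (fun s => (((PySem.List.index? pvDays day).getD 0 : Int), s))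

def entriesOf (l : List (String × List Int)) : List (Int × String) :=
  (pvDays.filter (fun day => (PySem.Dict.ofList l).contains day)).filterMap (entryOptK l)

-- length of the maximal prefix of consecutive same-hours entries
def pvRun : Int → String → List (Int × String) → Nat
  | _, _, [] => 0
  | i, s, f :: rest => if f.1 = i + 1 ∧ f.2 = s then 1 + pvRun f.1 s rest else 0

def pvGroups : List (Int × String) → List (Int × Int × String)
  | [] => []
  | e :: rest =>
    (e.1, e.1 + (pvRun e.1 e.2 rest : Int), e.2) :: pvGroups (rest.drop (pvRun e.1 e.2 rest))
termination_by l => l.length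
decreasing_by simp

def gFmt (t : Int × Int × String) : String :=
  (if t.1 = t.2.1 then PySem.List.pyGetD pvDays t.1 ""
   else PySem.List.pyGetD pvDays t.1 "" ++ "-" ++ PySem.List.pyGetD pvDays t.2.1 "")
  ++ "," ++ t.2.2

-- append-or-skip folds are filterMaps ---------------------------------------

lemma foldl_opt {α β : Type} (g : α → Option β) (l : List α) (acc : List β) :
    l.foldl (fun a x => a ++ (g x).toList) acc = acc ++ l.filterMap g := by
  induction l generalizing acc with
  | nil => simp
  | cons x t ih => cases hg : g x <;> simp [hg, ih]

-- sorted keys = the day list filtered by membership --------------------------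

lemma mem_keys_ofList {l : List (String × List Int)} {k : String}
    (h : k ∈ (PySem.Dict.ofList l).keys) : k ∈ l.map Prod.fst := by
  unfold PySem.Dict.ofList PySem.Dict.update at h
  rw [PySem.Dict.keys_foldl_insert_key l Prod.fst (fun _ p => p.2) PySem.Dict.empty,
    PySem.Set.mem_update] at h
  rcases h with h | h
  · simp [PySem.Dict.keys_empty] at h
  · exact h

lemma filter_perm_keys (l : List (String × List Int)) (hpre : Pre_format_logon_hours l) :
    (pvDays.filter (fun d => (PySem.Dict.ofList l).contains d)).Perm (PySem.Dict.ofList l).keys := by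
  rw [List.perm_ext_iff_of_nodup
    ((by decide : pvDays.Nodup).filter _) (PySem.Dict.nodup_keys_ofList l)]
  intro x
  simp only [List.mem_filter]
  constructor
  · rintro ⟨-, hk⟩; exact (PySem.Dict.contains_iff_mem_keys _ _).mp hk
  · intro hk
    refine ⟨?_, (PySem.Dict.contains_iff_mem_keys _ _).mpr hk⟩
    rcases List.mem_map.mp (mem_keys_ofList hk) with ⟨p, hp, rfl⟩
    exact hpre p hp

lemma sortedDays_eq (l : List (String × List Int)) (hpre : Pre_format_logon_hours l) :
    PySem.List.sorted (PySem.Dict.ofList l).keys (fun k => pvDaysMap.getD k 0)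
      = pvDays.filter (fun d => (PySem.Dict.ofList l).contains d) := by
  apply PySem.List.sorted_eq_of_perm_of_pairwise_lt
  · exact filter_perm_keys l hpre
  · exact List.Pairwise.sublist List.filter_sublist
      (by decide : pvDays.Pairwise (fun a b => pvDaysMap.getD a 0 < pvDaysMap.getD b 0))

-- A's formatted_parts are the rendered canonical entries ---------------------

lemma entryOptK_fst (l : List (String × List Int)) :
    ∀ (day : String) (x : Int × String), entryOptK l day = some x →
      x.1 = ((PySem.List.index? pvDays day).getD 0 : Int) := by
  intro day x hx
  rcases Option.map_eq_some_iff.mp hx with ⟨s, -, rfl⟩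
  rfl

lemma formatted_eq (l : List (String × List Int)) (hpre : Pre_format_logon_hours l) :
    ((PySem.List.sorted (PySem.Dict.ofList l).keys (fun k => pvDaysMap.getD k 0)).foldl
      (fun acc day =>
        match PySem.List.sorted (PySem.Set.ofList ((PySem.Dict.ofList l).getD day [])) (fun x => x) with
        | [] => acc
        | h0 :: rest =>
          acc ++ [day ++ "," ++ PySem.Str.join ","
            ((pvRangesLoop rest [] h0 h0).foldl
              (fun dp r => dp ++ [PySem.Int.toStr r.1 ++ "-" ++ PySem.Int.toStr (r.2 + 1)]) [])]) [])
      = (entriesOf l).map render := by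
  have hstep : (fun (acc : List String) (day : String) =>
      match PySem.List.sorted (PySem.Set.ofList ((PySem.Dict.ofList l).getD day [])) (fun x => x) with
      | [] => acc
      | h0 :: rest =>
        acc ++ [day ++ "," ++ PySem.Str.join ","
          ((pvRangesLoop rest [] h0 h0).foldl
            (fun dp r => dp ++ [PySem.Int.toStr r.1 ++ "-" ++ PySem.Int.toStr (r.2 + 1)]) [])])
      = (fun acc day => acc ++ (lineOpt l day).toList) := by
    funext acc day
    cases hs : PySem.List.sorted (PySem.Set.ofList ((PySem.Dict.ofList l).getD day [])) (fun x => x) with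
    | nil => simp [lineOpt, hs, hoursStr]
    | cons h0 rest =>
      simp only [lineOpt, hs, hoursStr, Option.map_some]
      rw [PySem.List.foldl_append_singleton_eq_map
        (fun r => PySem.Int.toStr r.1 ++ "-" ++ PySem.Int.toStr (r.2 + 1)) (pvRangesLoop rest [] h0 h0) []]
      rw [List.nil_append]
      rfl
  rw [hstep, foldl_opt (lineOpt l), List.nil_append, sortedDays_eq l hpre]
  rw [entriesOf, List.map_filterMap]
  apply List.filterMap_congr
  intro day hday
  have hmem : day ∈ pvDays := (List.mem_filter.mp hday).1
  have habbr : abbrOf (((PySem.List.index? pvDays day).getD 0 : Int)) = day := by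
    fin_cases hmem <;> decide
  cases ho : hoursStr (PySem.Dict.ofList l) day with
  | none => simp [lineOpt, entryOptK, ho]
  | some v =>
    simp [lineOpt, entryOptK, ho, render]
    exact habbr.symm

-- split(',') facts on the strings A builds ----------------------------------

lemma go_max_step (a : List Char) : ∀ (fuel m : Nat) (l cur : List Char) (acc : List (List Char)),
    ',' ∉ a → a.length < fuel → 0 < m →
    PySem.Chars.splitOnMax.go [','] fuel m (a ++ ',' :: l) cur acc
      = PySem.Chars.splitOnMax.go [','] (fuel - (a.length + 1)) (m - 1) l [] ((cur.reverse ++ a) :: acc) := by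
  induction a with
  | nil =>
    intro fuel m l cur acc _ hf hm
    obtain ⟨f, rfl⟩ : ∃ f, fuel = f + 1 := ⟨fuel - 1, by omega⟩
    rw [List.nil_append, PySem.Chars.splitOnMax.go.eq_def]
    simp [Nat.pos_iff_ne_zero.mp hm, List.isPrefixOf]
  | cons c a' ih =>
    intro fuel m l cur acc hna hf hm
    obtain ⟨f, rfl⟩ : ∃ f, fuel = f + 1 := ⟨fuel - 1, by omega⟩
    have hc : c ≠ ',' := fun h => hna (h ▸ List.mem_cons_self)
    rw [List.cons_append, PySem.Chars.splitOnMax.go.eq_def]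
    simp only [Nat.pos_iff_ne_zero.mp hm, if_false]
    have hpre : [','].isPrefixOf (c :: (a' ++ ',' :: l)) = false := by
      simp [List.isPrefixOf]
      exact fun h => absurd h.symm hc
    rw [hpre]
    simp only [Bool.false_eq_true, if_false]
    rw [ih f m l (c :: cur) acc (fun h => hna (List.mem_cons_of_mem c h)) (by simpa using hf) hm]
    simp [List.append_assoc]

lemma go_max_zero : ∀ (fuel : Nat) (l cur : List Char) (acc : List (List Char)),
    0 < fuel →
    PySem.Chars.splitOnMax.go [','] fuel 0 l cur acc = ((cur.reverse ++ l) :: acc).reverse := by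
  intro fuel l cur acc hf
  obtain ⟨f, rfl⟩ : ∃ f, fuel = f + 1 := ⟨fuel - 1, by omega⟩
  cases l with
  | nil => rw [PySem.Chars.splitOnMax.go.eq_def]; simp
  | cons c rest => rw [PySem.Chars.splitOnMax.go.eq_def]; simp

lemma str_split1 (d s : String) (hd : ',' ∉ d.toList) : pvSplit1 (d ++ "," ++ s) = (d, s) := by
  have h1 : (d ++ "," ++ s).toList = d.toList ++ ',' :: s.toList := by
    simp [String.toList_append]
  have hmax : PySem.Str.splitMax? (d ++ "," ++ s) "," 1 = some [d, s] := by
    unfold PySem.Str.splitMax?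
    rw [h1, show (",").toList = [','] from rfl]
    unfold PySem.Chars.splitMax?
    rw [if_neg (by decide)]
    unfold PySem.Chars.splitOnMax
    rw [if_neg (by decide)]
    rw [show ((1 : Int)).toNat = 1 from rfl]
    rw [go_max_step d.toList _ 1 s.toList [] [] hd (by simp) Nat.one_pos]
    rw [show (d.toList ++ ',' :: s.toList).length + 1 - (d.toList.length + 1)
        = s.toList.length + 1 from by simp]
    rw [go_max_zero (s.toList.length + 1) s.toList [] _ (by omega)]
    simp [String.ofList_toList]
  rw [pvSplit1, hmax]

lemma go_split_step (a : List Char) : ∀ (fuel : Nat) (l cur : List Char) (acc : List (List Char)),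
    ',' ∉ a → a.length < fuel →
    PySem.Chars.splitOn.go [','] fuel (a ++ ',' :: l) cur acc
      = PySem.Chars.splitOn.go [','] (fuel - (a.length + 1)) l [] ((cur.reverse ++ a) :: acc) := by
  induction a with
  | nil =>
    intro fuel l cur acc _ hf
    obtain ⟨f, rfl⟩ : ∃ f, fuel = f + 1 := ⟨fuel - 1, by omega⟩
    rw [List.nil_append, PySem.Chars.splitOn.go.eq_def]
    simp [List.isPrefixOf]
  | cons c a' ih =>
    intro fuel l cur acc hna hf
    obtain ⟨f, rfl⟩ : ∃ f, fuel = f + 1 := ⟨fuel - 1, by omega⟩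
    have hc : c ≠ ',' := fun h => hna (h ▸ List.mem_cons_self)
    rw [List.cons_append, PySem.Chars.splitOn.go.eq_def]
    have hpre : [','].isPrefixOf (c :: (a' ++ ',' :: l)) = false := by
      simp [List.isPrefixOf]
      exact fun h => absurd h.symm hc
    simp only [hpre, Bool.false_eq_true, if_false]
    rw [ih f l (c :: cur) acc (fun h => hna (List.mem_cons_of_mem c h)) (by simpa using hf)]
    simp [List.append_assoc]

lemma go_split_acc : ∀ (fuel : Nat) (l cur : List Char) (acc : List (List Char)),
    PySem.Chars.splitOn.go [','] fuel l cur acc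
      = acc.reverse ++ PySem.Chars.splitOn.go [','] fuel l cur [] := by
  intro fuel
  induction fuel with
  | zero => intro l cur acc; rw [PySem.Chars.splitOn.go.eq_def, PySem.Chars.splitOn.go.eq_def]; simp
  | succ f ih =>
    intro l cur acc
    cases l with
    | nil => rw [PySem.Chars.splitOn.go.eq_def, PySem.Chars.splitOn.go.eq_def]; simp
    | cons c rest =>
      rw [PySem.Chars.splitOn.go.eq_def]
      conv_rhs => rw [PySem.Chars.splitOn.go.eq_def]
      by_cases hp : [','].isPrefixOf (c :: rest) = true
      · simp only [hp, if_true]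
        rw [ih _ _ (cur.reverse :: acc), ih _ _ [cur.reverse]]
        simp
      · simp only [hp, Bool.false_eq_true, if_false]
        rw [ih rest (c :: cur) acc]

lemma str_splitHead (d s : String) (hd : ',' ∉ d.toList) : pvSplitHead (d ++ "," ++ s) = d := by
  have h1 : (d ++ "," ++ s).toList = d.toList ++ ',' :: s.toList := by
    simp [String.toList_append]
  have hsplit : PySem.Chars.splitOn ((d ++ "," ++ s).toList) [','] =
      d.toList :: PySem.Chars.splitOn.go [','] (s.toList.length + 1) s.toList [] [] := by
    unfold PySem.Chars.splitOn
    rw [h1, go_split_step d.toList _ s.toList [] [] hd (by simp)]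
    rw [show (d.toList ++ ',' :: s.toList).length + 1 - (d.toList.length + 1)
        = s.toList.length + 1 from by simp]
    rw [go_split_acc (s.toList.length + 1) s.toList [] _]
    simp
  have hchars : PySem.Chars.split? ((d ++ "," ++ s).toList) [','] =
      some (d.toList :: PySem.Chars.splitOn.go [','] (s.toList.length + 1) s.toList [] []) := by
    unfold PySem.Chars.split?
    rw [if_neg (by decide), hsplit]
  have hmap := PySem.Str.split?_map (d ++ "," ++ s) ","
  rw [show (",").toList = [','] from rfl, hchars] at hmap
  cases hsp : PySem.Str.split? (d ++ "," ++ s) "," with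
  | none => rw [hsp] at hmap; simp at hmap
  | some parts =>
    rw [hsp] at hmap
    simp only [Option.map_some, Option.some.injEq] at hmap
    cases parts with
    | nil => simp at hmap
    | cons p0 pr =>
      simp only [List.map_cons, List.cons.injEq] at hmap
      have hp0 : p0 = d := by
        have := congrArg String.ofList hmap.1
        simpa [String.ofList_toList] using this
      rw [pvSplitHead, hsp]
      simp [hp0, PySem.List.pyGetD_zero_cons]

-- literal-day facts ----------------------------------------------------------

lemma abbr_facts (i : Int) (h0 : 0 ≤ i) (h7 : i < 7) :
    ',' ∉ (abbrOf i).toList ∧ pvDaysMap.getD (abbrOf i) 0 = i := by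
  interval_cases i <;> exact ⟨by decide, by decide⟩

-- A's consolidation scan over rendered entries -------------------------------

lemma scan_eq (l : List (Int × String)) : ∀ (i : Int) (s last : String),
    (∀ e ∈ l, 0 ≤ e.1 ∧ e.1 < 7) →
    pvConsolidateScan i s last (l.map render)
      = (pvRun i s l, ((l.take (pvRun i s l)).map render).getLastD last) := by
  induction l with
  | nil => intro i s last _; simp [pvConsolidateScan, pvRun]
  | cons f t ih =>
    intro i s last hv
    have hf := hv f List.mem_cons_self
    have hsp : pvSplit1 (render f) = (abbrOf f.1, f.2) :=
      str_split1 _ _ (abbr_facts f.1 hf.1 hf.2).1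
    have hmap : pvDaysMap.getD (abbrOf f.1) 0 = f.1 := (abbr_facts f.1 hf.1 hf.2).2
    simp only [List.map_cons, pvConsolidateScan, hsp, hmap, pvRun]
    by_cases hc : f.1 = i + 1 ∧ f.2 = s
    · rw [if_pos hc, if_pos hc]
      rw [ih f.1 s (render f) (fun e he => hv e (List.mem_cons_of_mem f he))]
      rw [show (1 + pvRun f.1 s t) = (pvRun f.1 s t) + 1 from Nat.add_comm 1 _]
      simp only [List.take_succ_cons, List.map_cons, List.getLastD_cons]
    · rw [if_neg hc, if_neg hc]
      simp

lemma run_last (l : List (Int × String)) : ∀ (i : Int) (s last : String),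
    0 < pvRun i s l →
    ∃ z ∈ l, z.1 = i + (pvRun i s l : Int) ∧ z.2 = s ∧
      ((l.take (pvRun i s l)).map render).getLastD last = render z := by
  induction l with
  | nil => intro i s last h; simp [pvRun] at h
  | cons f t ih =>
    intro i s last h
    by_cases hc : f.1 = i + 1 ∧ f.2 = s
    · obtain ⟨h1, h2⟩ := hc
      rw [pvRun, if_pos ⟨h1, h2⟩] at h ⊢
      rw [show (1 + pvRun f.1 s t) = (pvRun f.1 s t) + 1 from Nat.add_comm 1 _]
      by_cases ht : 0 < pvRun f.1 s t
      · rcases ih f.1 s (render f) ht with ⟨z, hz, hz1, hz2, hz3⟩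
        refine ⟨z, List.mem_cons_of_mem f hz, ?_, hz2, ?_⟩
        · push_cast at hz1 ⊢; omega
        · rw [List.take_succ_cons, List.map_cons, List.getLastD_cons, hz3]
      · have h0 : pvRun f.1 s t = 0 := by omega
        refine ⟨f, List.mem_cons_self, ?_, h2, ?_⟩
        · rw [h0]; push_cast; omega
        · simp [h0]
    · rw [pvRun, if_neg hc] at h
      omega

lemma consolidate_eq : ∀ (n : Nat) (l : List (Int × String)), l.length ≤ n →
    (∀ e ∈ l, 0 ≤ e.1 ∧ e.1 < 7) →
    pvConsolidate (l.map render) = (pvGroups l).map gFmt := by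
  intro n
  induction n with
  | zero =>
    intro l hl _
    have hnil : l = [] := by
      cases l with
      | nil => rfl
      | cons a b => simp at hl
    subst hnil
    simp [pvConsolidate, pvGroups]
  | succ n ih =>
    intro l hl hv
    cases l with
    | nil => simp [pvConsolidate, pvGroups]
    | cons e rest =>
      have hev := hv e List.mem_cons_self
      have hvrest : ∀ x ∈ rest, 0 ≤ x.1 ∧ x.1 < 7 := fun x hx => hv x (List.mem_cons_of_mem e hx)
      have hsp1 : pvSplit1 (render e) = (abbrOf e.1, e.2) :=
        str_split1 _ _ (abbr_facts e.1 hev.1 hev.2).1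
      have hmapd : pvDaysMap.getD (abbrOf e.1) 0 = e.1 := (abbr_facts e.1 hev.1 hev.2).2
      rw [List.map_cons, pvConsolidate]
      simp only [hsp1, hmapd]
      rw [scan_eq rest e.1 e.2 (render e) hvrest]
      dsimp only
      rw [show pvGroups (e :: rest)
          = (e.1, e.1 + (pvRun e.1 e.2 rest : Int), e.2)
            :: pvGroups (rest.drop (pvRun e.1 e.2 rest)) from by rw [pvGroups]]
      by_cases h0 : pvRun e.1 e.2 rest = 0
      · rw [if_pos h0]
        rw [List.map_cons]
        rw [show gFmt (e.1, e.1 + ((pvRun e.1 e.2 rest : Nat) : Int), e.2) = render e from by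
          simp [gFmt, render, abbrOf, h0]]
        rw [ih rest (by simpa using Nat.le_of_succ_le_succ hl) hvrest]
        rw [h0, List.drop_zero]
      · have hkpos : 0 < pvRun e.1 e.2 rest := Nat.pos_of_ne_zero h0
        rcases run_last rest e.1 e.2 (render e) hkpos with ⟨z, hz, hz1, -, hz3⟩
        have hzv := hvrest z hz
        rw [if_neg h0]
        rw [hz3]
        rw [show pvSplitHead (render e) = abbrOf e.1 from
          str_splitHead _ _ (abbr_facts e.1 hev.1 hev.2).1]
        rw [show pvSplitHead (render z) = abbrOf z.1 from
          str_splitHead _ _ (abbr_facts z.1 hzv.1 hzv.2).1]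
        rw [List.map_cons]
        rw [show gFmt (e.1, e.1 + ((pvRun e.1 e.2 rest : Nat) : Int), e.2)
            = abbrOf e.1 ++ "-" ++ abbrOf (e.1 + (pvRun e.1 e.2 rest : Int)) ++ "," ++ e.2 from by
          rw [gFmt]
          rw [if_neg (by push_cast; omega)]
          rfl]
        rw [hz1]
        rw [← List.map_drop]
        rw [ih (rest.drop (pvRun e.1 e.2 rest))
          (by
            have hd := List.length_drop (l := rest) (i := pvRun e.1 e.2 rest)
            simp only [List.length_cons] at hl
            omega)
          (fun x hx => hvrest x (List.mem_of_mem_drop hx))]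

-- entries carry valid day indices --------------------------------------------

lemma valid_entries (l : List (String × List Int)) :
    ∀ e ∈ entriesOf l, 0 ≤ e.1 ∧ e.1 < 7 := by
  intro e he
  rcases List.mem_filterMap.mp he with ⟨day, hday, heq⟩
  have hmem : day ∈ pvDays := (List.mem_filter.mp hday).1
  rw [entryOptK_fst l day e heq]
  have hall : ∀ d ∈ pvDays,
      0 ≤ ((PySem.List.index? pvDays d).getD 0 : Int) ∧ ((PySem.List.index? pvDays d).getD 0 : Int) < 7 := by
    decide
  exact hall day hmem

-- ===== B-side lemmas: the zip-of-boundaries view =====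

-- decomposition of A's range loop: the accumulated prefix splits off …
lemma rangesLoop_acc : ∀ (t : List Int) (r : List (Int × Int)) (s e : Int),
    pvRangesLoop t r s e = r ++ pvRangesLoop t [] s e := by
  intro t
  induction t with
  | nil => intro r s e; simp [pvRangesLoop]
  | cons x t ih =>
    intro r s e
    by_cases h : x = e + 1
    · simp only [pvRangesLoop, if_pos h]
      exact ih r s x
    · simp only [pvRangesLoop, if_neg h, List.nil_append]
      rw [ih (r ++ [(s, e)]) x x, ih [(s, e)] x x]
      simp

-- … and the first range ends at runEnd, the rest restart at runRest
def runEnd (e : Int) : List Int → Int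
  | [] => e
  | x :: t => if x = e + 1 then runEnd x t else e

def runRest (e : Int) : List Int → List Int
  | [] => []
  | x :: t => if x = e + 1 then runRest x t else x :: t

def runsOf : List Int → List (Int × Int)
  | [] => []
  | h :: t => pvRangesLoop t [] h h

lemma rangesLoop_decomp : ∀ (t : List Int) (s e : Int),
    pvRangesLoop t [] s e = (s, runEnd e t) :: runsOf (runRest e t) := by
  intro t
  induction t with
  | nil => intro s e; simp [pvRangesLoop, runEnd, runRest, runsOf]
  | cons x t ih =>
    intro s e
    by_cases h : x = e + 1
    · simp only [pvRangesLoop, runEnd, runRest, if_pos h]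
      exact ih s x
    · simp only [pvRangesLoop, runEnd, runRest, if_neg h, List.nil_append]
      rw [rangesLoop_acc t [(s, e)] x x]
      rfl

-- the boundary filters of a strictly increasing list zip to its runs
lemma zip_filter_runs : ∀ (L : List Int), L.Pairwise (· < ·) →
    (L.filter (fun x => !decide ((x - 1) ∈ L))).zip (L.filter (fun x => !decide ((x + 1) ∈ L)))
      = runsOf L := by
  intro L
  induction L with
  | nil => intro _; rfl
  | cons h T ih =>
    intro hp
    obtain ⟨hlt, hpT⟩ := List.pairwise_cons.mp hp
    have hS : ¬ (h - 1) ∈ h :: T := by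
      intro hm
      rcases List.mem_cons.mp hm with e | hmT
      · omega
      · exact absurd (hlt _ hmT) (by omega)
    cases T with
    | nil =>
      have hE : ¬ (h + 1) ∈ [h] := by simp
      simp [runsOf, pvRangesLoop]
    | cons y t' =>
      have hhy : h < y := hlt y List.mem_cons_self
      obtain ⟨hylt, hpt'⟩ := List.pairwise_cons.mp hpT
      by_cases hy : y = h + 1
      · subst hy
        have hs1 : (h :: (h+1) :: t').filter (fun x => !decide ((x - 1) ∈ h :: (h+1) :: t'))
            = h :: t'.filter (fun x => !decide ((x - 1) ∈ (h+1) :: t')) := by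
          rw [List.filter_cons_of_pos (by simpa using hS),
            List.filter_cons_of_neg (by simp)]
          congr 1
          apply List.filter_congr
          intro x hx
          have hxgt : h + 1 < x := hylt x hx
          apply congrArg (fun b => !b)
          rw [decide_eq_decide]
          simp only [List.mem_cons]
          constructor
          · rintro (e | hr)
            · exact absurd e (by omega)
            · exact hr
          · intro hr
            exact Or.inr hr
        have hs2 : ((h+1) :: t').filter (fun x => !decide ((x - 1) ∈ (h+1) :: t'))
            = (h+1) :: t'.filter (fun x => !decide ((x - 1) ∈ (h+1) :: t')) := by
          rw [List.filter_cons_of_pos]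
          simp only [Bool.not_eq_eq_eq_not, Bool.not_true, decide_eq_false_iff_not,
            List.mem_cons]
          rintro (e | e)
          · omega
          · exact absurd (hylt _ e) (by omega)
        have he1 : (h :: (h+1) :: t').filter (fun x => !decide ((x + 1) ∈ h :: (h+1) :: t'))
            = ((h+1) :: t').filter (fun x => !decide ((x + 1) ∈ (h+1) :: t')) := by
          rw [List.filter_cons_of_neg (by simp)]
          apply List.filter_congr
          intro x hx
          have hxge : h + 1 ≤ x := by
            rcases List.mem_cons.mp hx with e | e
            · omega
            · have := hylt x e; omega
          apply congrArg (fun b => !b)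
          rw [decide_eq_decide]
          simp only [List.mem_cons]
          constructor
          · rintro (e | hr)
            · exact absurd e (by omega)
            · exact hr
          · intro hr
            exact Or.inr hr
        have hIH := ih hpT
        rw [hs2] at hIH
        rw [show runsOf ((h+1) :: t') = pvRangesLoop t' [] (h+1) (h+1) from rfl,
          rangesLoop_decomp t' (h+1) (h+1)] at hIH
        cases hEnds : ((h+1) :: t').filter (fun x => !decide ((x + 1) ∈ (h+1) :: t')) with
        | nil => rw [hEnds] at hIH; simp at hIH
        | cons e0 E =>
          rw [hEnds, List.zip_cons_cons, List.cons.injEq, Prod.mk.injEq] at hIH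
          obtain ⟨⟨-, he0⟩, hrest⟩ := hIH
          rw [hs1, he1, hEnds, List.zip_cons_cons, hrest, he0]
          show _ = runsOf (h :: (h+1) :: t')
          simp only [runsOf, pvRangesLoop, List.nil_append]
          rw [if_pos trivial, rangesLoop_decomp t' h (h+1)]
          rfl
      · have hy' : h + 1 < y := by omega
        have hs1 : (h :: y :: t').filter (fun x => !decide ((x - 1) ∈ h :: y :: t'))
            = h :: (y :: t').filter (fun x => !decide ((x - 1) ∈ y :: t')) := by
          rw [List.filter_cons_of_pos (by simpa using hS)]
          congr 1
          apply List.filter_congr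
          intro x hx
          have hxge : y ≤ x := by
            rcases List.mem_cons.mp hx with e | e
            · omega
            · have := hylt x e; omega
          apply congrArg (fun b => !b)
          rw [decide_eq_decide]
          simp only [List.mem_cons]
          constructor
          · rintro (e | hr)
            · exact absurd e (by omega)
            · exact hr
          · intro hr
            exact Or.inr hr
        have he1 : (h :: y :: t').filter (fun x => !decide ((x + 1) ∈ h :: y :: t'))
            = h :: (y :: t').filter (fun x => !decide ((x + 1) ∈ y :: t')) := by
          rw [List.filter_cons_of_pos]
          · congr 1
            apply List.filter_congr
            intro x hx
            have hxge : y ≤ x := by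
              rcases List.mem_cons.mp hx with e | e
              · omega
              · have := hylt x e; omega
            apply congrArg (fun b => !b)
            rw [decide_eq_decide]
            simp only [List.mem_cons]
            constructor
            · rintro (e | hr)
              · exact absurd e (by omega)
              · exact hr
            · intro hr
              exact Or.inr hr
          · simp only [Bool.not_eq_eq_eq_not, Bool.not_true, decide_eq_false_iff_not,
              List.mem_cons]
            rintro (e | e | e)
            · omega
            · omega
            · exact absurd (hylt _ e) (by omega)
        rw [hs1, he1, List.zip_cons_cons, ih hpT]
        show _ = runsOf (h :: y :: t')
        simp only [runsOf, pvRangesLoop, if_neg hy, List.nil_append]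
        rw [rangesLoop_acc t' [(h, h)] y y]
        rfl

-- B's hour_str computes the joined runs of the sorted dedup list
lemma pvHourStr_eq (hs : List Int) :
    pvHourStr hs = PySem.Str.join ","
      ((runsOf (PySem.List.sorted (PySem.Set.ofList hs) (fun x => x))).map
        (fun r => PySem.Int.toStr r.1 ++ "-" ++ PySem.Int.toStr (r.2 + 1))) := by
  unfold pvHourStr
  dsimp only
  have hL := PySem.List.sorted_ofList_pairwise_lt (xs := hs)
  set s : List Int := PySem.Set.ofList hs with hsdef
  set L : List Int := PySem.List.sorted s (fun x => x) with hLdef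
  have hperm : L.Perm s := PySem.List.sorted_perm s (fun x => x) false
  have hmem : ∀ y : Int, (y ∈ s) ↔ (y ∈ L) := fun y => (hperm.mem_iff).symm
  have hfix : ∀ (c : Int), (fun h => !(PySem.Set.contains s (h + c)))
      = (fun x => !decide ((x + c) ∈ L)) := by
    intro c
    funext x
    have : PySem.Set.contains s (x + c) = decide ((x + c) ∈ L) := by
      by_cases hm : (x + c) ∈ L
      · simp [hm, (hmem (x + c)).mpr hm]
      · simp only [hm, decide_false]
        rw [← Bool.not_eq_true]
        intro hc
        exact hm ((hmem (x + c)).mp ((PySem.Set.contains_iff _ _).mp hc))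
    rw [this]
  have hfilter : ∀ (c : Int), PySem.List.sorted (s.filter (fun h => !(PySem.Set.contains s (h + c)))) (fun x => x)
      = L.filter (fun x => !decide ((x + c) ∈ L)) := by
    intro c
    apply PySem.List.sorted_eq_of_perm_of_pairwise_lt
    · rw [hfix c]
      exact hperm.filter _
    · exact List.Pairwise.sublist List.filter_sublist hL
  have hm1 : (fun h : Int => !(PySem.Set.contains s (h - 1))) = (fun h : Int => !(PySem.Set.contains s (h + (-1)))) := by
    funext x; rw [show x - 1 = x + (-1) from by omega]
  have hsub : (fun x : Int => !decide ((x + (-1)) ∈ L)) = (fun x : Int => !decide ((x - 1) ∈ L)) := by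
    funext x; rw [show x + (-1) = x - 1 from by omega]
  rw [hm1, hfilter (-1), hfilter 1, hsub, zip_filter_runs L hL]

-- B's slot entry is the canonical per-day hour string
lemma slot_item (l : List (String × List Int)) (day : String) :
    (if (PySem.Dict.ofList l).contains day ∧ (PySem.Dict.ofList l).getD day [] ≠ [] then
      some (pvHourStr ((PySem.Dict.ofList l).getD day [])) else none)
      = hoursStr (PySem.Dict.ofList l) day := by
  by_cases hnil : (PySem.Dict.ofList l).getD day [] = []
  · rw [if_neg (by tauto)]
    unfold hoursStr
    rw [hnil]
    rfl
  · have hcont : (PySem.Dict.ofList l).contains day = true := by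
      by_cases hc : (PySem.Dict.ofList l).contains day = true
      · exact hc
      · exact absurd (PySem.Dict.getD_of_not_contains _ _ (by simpa using hc)) hnil
    rw [if_pos ⟨hcont, hnil⟩]
    have hsne : PySem.Set.ofList ((PySem.Dict.ofList l).getD day []) ≠ [] := by
      rcases List.exists_mem_of_ne_nil _ hnil with ⟨a, ha⟩
      exact List.ne_nil_of_mem ((PySem.Set.mem_ofList _ _).mpr ha)
    have hLne : PySem.List.sorted (PySem.Set.ofList ((PySem.Dict.ofList l).getD day [])) (fun x => x) ≠ [] := by
      rw [Ne, PySem.List.sorted_eq_nil_iff]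
      exact hsne
    unfold hoursStr
    cases hL : PySem.List.sorted (PySem.Set.ofList ((PySem.Dict.ofList l).getD day [])) (fun x => x) with
    | nil => exact absurd hL hLne
    | cons h0 rest =>
      rw [pvHourStr_eq, hL]
      rfl

-- writing slot[days.index(k)] on the 7-day table ----------------------------

lemma setD_days (g : String → Option String) (v : Option String) (k : String) (hk : k ∈ pvDays) :
    PySem.List.pySetD (pvDays.map g) ((PySem.List.index? pvDays k).getD 0 : Int) v
      = pvDays.map (fun d => if d = k then v else g d) := by
  fin_cases hk <;>
    simp [pvDays, PySem.List.pySetD, PySem.List.pySet?, PySem.List.pyIdx?,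
      List.idxOf?, List.findIdx?, List.findIdx?.go]

lemma slot_fold (dct : PySem.Dict String (List Int)) :
    ∀ (keys : List String) (g : String → Option String), (∀ k ∈ keys, k ∈ pvDays) →
    keys.foldl (fun sl k =>
        if dct.getD k [] ≠ [] then
          PySem.List.pySetD sl ((PySem.List.index? pvDays k).getD 0 : Int)
            (some (pvHourStr (dct.getD k [])))
        else sl)
      (pvDays.map g)
    = pvDays.map (fun day =>
        if day ∈ keys ∧ dct.getD day [] ≠ [] then some (pvHourStr (dct.getD day [])) else g day) := by
  intro keys
  induction keys with
  | nil =>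
    intro g _
    apply List.map_congr_left
    intro day _
    simp
  | cons k rest ih =>
    intro g hsub
    have hk : k ∈ pvDays := hsub k List.mem_cons_self
    rw [List.foldl_cons]
    by_cases hne : dct.getD k [] ≠ []
    · rw [if_pos hne, setD_days g _ k hk,
        ih _ (fun x hx => hsub x (List.mem_cons_of_mem k hx))]
      apply List.map_congr_left
      intro day _
      by_cases h1 : day ∈ rest ∧ dct.getD day [] ≠ []
      · rw [if_pos h1, if_pos ⟨List.mem_cons_of_mem k h1.1, h1.2⟩]
      · rw [if_neg h1]
        by_cases h2 : day = k
        · subst h2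
          rw [if_pos rfl, if_pos ⟨List.mem_cons_self, hne⟩]
        · rw [if_neg h2, if_neg (by
            rintro ⟨hm, hd⟩
            rcases List.mem_cons.mp hm with h | h
            · exact h2 h
            · exact h1 ⟨h, hd⟩)]
    · rw [if_neg hne, ih g (fun x hx => hsub x (List.mem_cons_of_mem k hx))]
      apply List.map_congr_left
      intro day _
      by_cases h1 : day ∈ rest ∧ dct.getD day [] ≠ []
      · rw [if_pos h1, if_pos ⟨List.mem_cons_of_mem k h1.1, h1.2⟩]
      · rw [if_neg h1, if_neg (by
          rintro ⟨hm, hd⟩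
          rcases List.mem_cons.mp hm with h | h
          · subst h; exact hne hd
          · exact h1 ⟨h, hd⟩)]

-- ===== B-side lemmas: slot table, boundary groups =====

-- the entries a slot table encodes (index offset k)
def ents : Int → List (Option String) → List (Int × String)
  | _, [] => []
  | k, none :: rest => ents (k + 1) rest
  | k, some s :: rest => (k, s) :: ents (k + 1) rest

-- length of the prefix of slots equal to `some s`
def eqRun (s : String) : List (Option String) → Nat
  | [] => 0
  | o :: rest => if o = some s then 1 + eqRun s rest else 0

-- the day groups of a slot table
def grpRec : Int → List (Option String) → List (Int × Int × String)
  | _, [] => []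
  | k, none :: rest => grpRec (k + 1) rest
  | k, some s :: rest =>
    (k, k + (eqRun s rest : Int), s) :: grpRec (k + 1 + (eqRun s rest : Int)) (rest.drop (eqRun s rest))
termination_by _ slot => slot.length
decreasing_by
  · simp
  · simp only [List.length_cons]
    have := List.length_drop (l := rest) (i := eqRun s rest)
    omega

-- B's start/end boundary scans of the slot table
def dstarts : Int → Option String → List (Option String) → List Int
  | _, _, [] => []
  | k, prev, o :: rest => (if o ≠ none ∧ o ≠ prev then [k] else []) ++ dstarts (k + 1) o rest

def dends : Int → List (Option String) → List Int
  | _, [] => []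
  | k, o :: rest => (if o ≠ none ∧ o ≠ rest.head?.getD none then [k] else []) ++ dends (k + 1) rest

lemma ents_idx_ge : ∀ (slot : List (Option String)) (k : Int), ∀ e ∈ ents k slot, k ≤ e.1 := by
  intro slot
  induction slot with
  | nil => intro k e he; simp [ents] at he
  | cons o rest ih =>
    intro k e he
    cases o with
    | none =>
      have := ih (k + 1) e he
      omega
    | some s =>
      rcases List.mem_cons.mp he with rfl | hm
      · simp
      · have := ih (k + 1) e hm
        omega

lemma ents_run_drop : ∀ (rest : List (Option String)) (k : Int) (s : String),
    pvRun k s (ents (k + 1) rest) = eqRun s rest ∧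
    (ents (k + 1) rest).drop (eqRun s rest) = ents (k + 1 + (eqRun s rest : Int)) (rest.drop (eqRun s rest)) := by
  intro rest
  induction rest with
  | nil => intro k s; simp [ents, pvRun, eqRun]
  | cons o r ih =>
    intro k s
    cases o with
    | none =>
      have hz : pvRun k s (ents (k + 2) r) = 0 := by
        cases hr : ents (k + 2) r with
        | nil => simp [pvRun]
        | cons f X =>
          have hge : k + 2 ≤ f.1 := ents_idx_ge r (k + 2) f (hr ▸ List.mem_cons_self)
          rw [pvRun, if_neg (by rintro ⟨h1, -⟩; omega)]
      constructor
      · show pvRun k s (ents (k + 1) (none :: r)) = eqRun s (none :: r)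
        rw [show ents (k + 1) (none :: r) = ents (k + 2) r from by
          rw [show ents (k + 1) (none :: r) = ents (k + 1 + 1) r from rfl,
            show k + 1 + 1 = k + 2 from by omega]]
        rw [hz]
        simp [eqRun]
      · simp [eqRun]
    | some s' =>
      by_cases hss : s' = s
      · subst hss
        have ih' := ih (k + 1) s'
        constructor
        · show pvRun k s' ((k + 1, s') :: ents (k + 1 + 1) r) = eqRun s' (some s' :: r)
          rw [pvRun, if_pos ⟨rfl, rfl⟩]
          rw [show ents (k + 1 + 1) r = ents (k + 1 + 1) r from rfl, ih'.1]
          simp [eqRun]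
        · show ((k + 1, s') :: ents (k + 1 + 1) r).drop (eqRun s' (some s' :: r)) = _
          rw [show eqRun s' (some s' :: r) = eqRun s' r + 1 from by simp [eqRun, Nat.add_comm]]
          rw [List.drop_succ_cons, ih'.2]
          congr 1
          push_cast
          omega
      · constructor
        · show pvRun k s ((k + 1, s') :: ents (k + 1 + 1) r) = eqRun s (some s' :: r)
          rw [pvRun, if_neg (by rintro ⟨-, h2⟩; exact hss h2)]
          rw [eqRun, if_neg (by simpa using hss)]
        · rw [show eqRun s (some s' :: r) = 0 from by rw [eqRun, if_neg (by simpa using hss)]]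
          simp [ents]

lemma groups_ents : ∀ (n : Nat) (slot : List (Option String)) (k : Int), slot.length ≤ n →
    pvGroups (ents k slot) = grpRec k slot := by
  intro n
  induction n with
  | zero =>
    intro slot k hl
    have : slot = [] := by cases slot with
      | nil => rfl
      | cons a b => simp at hl
    subst this
    simp [ents, pvGroups, grpRec]
  | succ n ih =>
    intro slot k hl
    cases slot with
    | nil => simp [ents, pvGroups, grpRec]
    | cons o rest =>
      cases o with
      | none =>
        rw [show ents k (none :: rest) = ents (k + 1) rest from rfl,
          show grpRec k (none :: rest) = grpRec (k + 1) rest from by rw [grpRec]]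
        exact ih rest (k + 1) (by simpa using Nat.le_of_succ_le_succ hl)
      | some s =>
        show pvGroups ((k, s) :: ents (k + 1) rest) = _
        rw [show pvGroups ((k, s) :: ents (k + 1) rest)
            = (k, k + (pvRun k s (ents (k + 1) rest) : Int), s)
              :: pvGroups ((ents (k + 1) rest).drop (pvRun k s (ents (k + 1) rest))) from by
          rw [pvGroups]]
        obtain ⟨h1, h2⟩ := ents_run_drop rest k s
        rw [h1, h2]
        rw [show grpRec k (some s :: rest)
            = (k, k + (eqRun s rest : Int), s)
              :: grpRec (k + 1 + (eqRun s rest : Int)) (rest.drop (eqRun s rest)) from by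
          rw [grpRec]]
        congr 1
        apply ih
        have := List.length_drop (l := rest) (i := eqRun s rest)
        simp only [List.length_cons] at hl
        omega

lemma dstarts_skip : ∀ (rest : List (Option String)) (k : Int) (s : String),
    dstarts k (some s) rest = dstarts (k + (eqRun s rest : Int)) (some s) (rest.drop (eqRun s rest)) := by
  intro rest
  induction rest with
  | nil => intro k s; simp [eqRun]
  | cons o r ih =>
    intro k s
    by_cases ho : o = some s
    · subst ho
      rw [dstarts, if_neg (by rintro ⟨-, h2⟩; exact h2 rfl), List.nil_append]
      rw [ih (k + 1) s]
      rw [show eqRun s (some s :: r) = eqRun s r + 1 from by simp [eqRun, Nat.add_comm]]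
      rw [List.drop_succ_cons]
      congr 1
      push_cast
      omega
    · rw [show eqRun s (o :: r) = 0 from by rw [eqRun, if_neg ho]]
      simp

lemma eqRun_head_ne : ∀ (rest : List (Option String)) (s : String) (o : Option String),
    (rest.drop (eqRun s rest)).head? = some o → o ≠ some s := by
  intro rest
  induction rest with
  | nil => intro s o h; simp at h
  | cons o' r ih =>
    intro s o h
    by_cases ho : o' = some s
    · subst ho
      rw [show eqRun s (some s :: r) = eqRun s r + 1 from by simp [eqRun, Nat.add_comm],
        List.drop_succ_cons] at h
      exact ih s o h
    · rw [show eqRun s (o' :: r) = 0 from by rw [eqRun, if_neg ho], List.drop_zero,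
        List.head?_cons, Option.some.injEq] at h
      exact h ▸ ho

lemma dstarts_grp : ∀ (n : Nat) (slot : List (Option String)) (k : Int) (prev : Option String),
    slot.length ≤ n →
    (∀ o, slot.head? = some o → o = none ∨ o ≠ prev) →
    dstarts k prev slot = (grpRec k slot).map (fun t => t.1) := by
  intro n
  induction n with
  | zero =>
    intro slot k prev hl _
    have : slot = [] := by cases slot with
      | nil => rfl
      | cons a b => simp at hl
    subst this
    simp [dstarts, grpRec]
  | succ n ih =>
    intro slot k prev hl hh
    cases slot with
    | nil => simp [dstarts, grpRec]
    | cons o rest =>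
      cases o with
      | none =>
        rw [dstarts, if_neg (by rintro ⟨h1, -⟩; exact h1 rfl), List.nil_append]
        rw [show grpRec k (none :: rest) = grpRec (k + 1) rest from by rw [grpRec]]
        apply ih rest (k + 1) none (by simpa using Nat.le_of_succ_le_succ hl)
        intro o ho
        by_cases hon : o = none
        · exact Or.inl hon
        · exact Or.inr hon
      | some s =>
        have hne : (some s : Option String) ≠ prev := by
          rcases hh (some s) rfl with h | h
          · exact absurd h (by simp)
          · exact h
        rw [dstarts, if_pos ⟨by simp, hne⟩]
        rw [dstarts_skip rest (k + 1) s]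
        rw [show grpRec k (some s :: rest)
            = (k, k + (eqRun s rest : Int), s)
              :: grpRec (k + 1 + (eqRun s rest : Int)) (rest.drop (eqRun s rest)) from by
          rw [grpRec]]
        rw [List.map_cons]
        rw [show (k + 1 + (eqRun s rest : Int)) = (k + 1 + (eqRun s rest : Int)) from rfl]
        rw [ih (rest.drop (eqRun s rest)) (k + 1 + (eqRun s rest : Int)) (some s)
          (by
            have := List.length_drop (l := rest) (i := eqRun s rest)
            simp only [List.length_cons] at hl
            omega)
          (by
            intro o ho
            exact Or.inr (eqRun_head_ne rest s o ho))]
        rw [show k + 1 + (eqRun s rest : Int) = k + (eqRun s rest : Int) + 1 from by omega]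
        rfl

lemma dends_grp : ∀ (n : Nat) (slot : List (Option String)) (k : Int), slot.length ≤ n →
    dends k slot = (grpRec k slot).map (fun t => t.2.1) := by
  intro n
  induction n with
  | zero =>
    intro slot k hl
    have : slot = [] := by cases slot with
      | nil => rfl
      | cons a b => simp at hl
    subst this
    simp [dends, grpRec]
  | succ n ih =>
    intro slot k hl
    cases slot with
    | nil => simp [dends, grpRec]
    | cons o rest =>
      cases o with
      | none =>
        rw [dends, if_neg (by rintro ⟨h1, -⟩; exact h1 rfl), List.nil_append]
        rw [show grpRec k (none :: rest) = grpRec (k + 1) rest from by rw [grpRec]]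
        exact ih rest (k + 1) (by simpa using Nat.le_of_succ_le_succ hl)
      | some s =>
        cases rest with
        | nil =>
          rw [dends, if_pos ⟨by simp, by simp⟩]
          rw [show grpRec k [some s] = [(k, k + ((eqRun s [] : Nat) : Int), s)] from by
            rw [grpRec]; simp [grpRec]]
          simp [eqRun, dends]
        | cons o' r =>
          by_cases ho : o' = some s
          · subst ho
            rw [dends, if_neg (by rintro ⟨-, h2⟩; simp at h2), List.nil_append]
            rw [ih (some s :: r) (k + 1) (by simpa using Nat.le_of_succ_le_succ hl)]
            rw [show grpRec k (some s :: some s :: r)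
                = (k, k + (eqRun s (some s :: r) : Int), s)
                  :: grpRec (k + 1 + (eqRun s (some s :: r) : Int))
                    ((some s :: r).drop (eqRun s (some s :: r))) from by rw [grpRec]]
            rw [show grpRec (k + 1) (some s :: r)
                = (k + 1, k + 1 + (eqRun s r : Int), s)
                  :: grpRec (k + 1 + 1 + (eqRun s r : Int)) (r.drop (eqRun s r)) from by
              rw [grpRec]]
            rw [show eqRun s (some s :: r) = eqRun s r + 1 from by simp [eqRun, Nat.add_comm]]
            rw [List.drop_succ_cons]
            rw [show k + ((eqRun s r + 1 : Nat) : Int) = k + 1 + (eqRun s r : Int) from by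
                push_cast; omega,
              show k + 1 + ((eqRun s r + 1 : Nat) : Int) = k + 1 + 1 + (eqRun s r : Int) from by
                push_cast; omega]
            simp
          · rw [dends, if_pos ⟨by simp, by simpa using fun h => ho h.symm⟩]
            rw [ih (o' :: r) (k + 1) (by simpa using Nat.le_of_succ_le_succ hl)]
            rw [show grpRec k (some s :: o' :: r)
                = (k, k + (eqRun s (o' :: r) : Int), s)
                  :: grpRec (k + 1 + (eqRun s (o' :: r) : Int))
                    ((o' :: r).drop (eqRun s (o' :: r))) from by rw [grpRec]]
            rw [show eqRun s (o' :: r) = 0 from by rw [eqRun, if_neg ho]]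
            simp

lemma grp_val : ∀ (n : Nat) (slot : List (Option String)) (k : Int) (t : Int × Int × String),
    slot.length ≤ n → t ∈ grpRec k slot →
    0 ≤ t.1 - k ∧ slot[(t.1 - k).toNat]? = some (some t.2.2) := by
  intro n
  induction n with
  | zero =>
    intro slot k t hl ht
    have : slot = [] := by cases slot with
      | nil => rfl
      | cons a b => simp at hl
    subst this
    simp [grpRec] at ht
  | succ n ih =>
    intro slot k t hl ht
    cases slot with
    | nil => simp [grpRec] at ht
    | cons o rest =>
      cases o with
      | none =>
        rw [show grpRec k (none :: rest) = grpRec (k + 1) rest from by rw [grpRec]] at ht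
        obtain ⟨h0, hget⟩ := ih rest (k + 1) t (by simpa using Nat.le_of_succ_le_succ hl) ht
        refine ⟨by omega, ?_⟩
        rw [show (t.1 - k).toNat = (t.1 - (k + 1)).toNat + 1 from by omega]
        simpa using hget
      | some s =>
        rw [show grpRec k (some s :: rest)
            = (k, k + (eqRun s rest : Int), s)
              :: grpRec (k + 1 + (eqRun s rest : Int)) (rest.drop (eqRun s rest)) from by
          rw [grpRec]] at ht
        rcases List.mem_cons.mp ht with rfl | hm
        · simp
        · obtain ⟨h0, hget⟩ := ih (rest.drop (eqRun s rest)) (k + 1 + (eqRun s rest : Int)) t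
            (by
              have := List.length_drop (l := rest) (i := eqRun s rest)
              simp only [List.length_cons] at hl
              omega) hm
          rw [List.getElem?_drop] at hget
          refine ⟨by omega, ?_⟩
          rw [show (t.1 - k).toNat = (eqRun s rest + (t.1 - (k + 1 + (eqRun s rest : Int))).toNat) + 1 from by omega]
          simpa using hget

-- the entries of a mapped day list ------------------------------------------

lemma ents_map_gen (g : String → Option String) (idx : String → Int) :
    ∀ (ds : List String) (k : Int), (∀ (j : Nat) (hj : j < ds.length), idx ds[j] = k + j) →
    ents k (ds.map g) = ds.filterMap (fun d => (g d).map (fun s => (idx d, s))) := by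
  intro ds
  induction ds with
  | nil => intro k _; rfl
  | cons d rest ih =>
    intro k hidx
    have hd : idx d = k := by simpa using hidx 0 (by simp)
    have hrest : ∀ (j : Nat) (hj : j < rest.length), idx rest[j] = (k + 1) + j := by
      intro j hj
      have := hidx (j + 1) (by simpa using Nat.succ_lt_succ hj)
      simp only [List.getElem_cons_succ] at this
      rw [this]
      push_cast
      omega
    rw [List.map_cons, List.filterMap_cons]
    cases hg : g d with
    | none =>
      show ents (k + 1) (rest.map g) = _
      rw [ih (k + 1) hrest]
      rfl
    | some s =>
      show (k, s) :: ents (k + 1) (rest.map g) = _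
      rw [ih (k + 1) hrest, Option.map_some, hd]

lemma filterMap_filter_of_none {β : Type} (p : String → Bool) (g : String → Option β) :
    ∀ (l : List String), (∀ x ∈ l, p x = false → g x = none) →
    (l.filter p).filterMap g = l.filterMap g := by
  intro l
  induction l with
  | nil => intro _; rfl
  | cons x t ih =>
    intro h
    by_cases hp : p x = true
    · rw [List.filter_cons_of_pos hp, List.filterMap_cons, List.filterMap_cons]
      cases g x <;> simp [ih (fun y hy => h y (List.mem_cons_of_mem x hy))]
    · rw [List.filter_cons_of_neg (by simpa using hp), List.filterMap_cons,
        h x List.mem_cons_self (by simpa using hp)]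
      exact ih (fun y hy => h y (List.mem_cons_of_mem x hy))

lemma hoursStr_of_not_contains (l : List (String × List Int)) (day : String)
    (h : (PySem.Dict.ofList l).contains day = false) :
    hoursStr (PySem.Dict.ofList l) day = none := by
  unfold hoursStr
  rw [PySem.Dict.getD_of_not_contains _ _ h]
  rfl

lemma ents_eq (l : List (String × List Int)) :
    entriesOf l = ents 0 (pvDays.map (fun day => hoursStr (PySem.Dict.ofList l) day)) := by
  rw [ents_map_gen (fun day => hoursStr (PySem.Dict.ofList l) day)
    (fun day => ((PySem.List.index? pvDays day).getD 0 : Int)) pvDays 0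
    (by
      intro j hj
      have hj7 : j < 7 := by simpa [pvDays] using hj
      interval_cases j <;> simp [pvDays] <;> decide)]
  rw [entriesOf]
  rw [filterMap_filter_of_none _ _ pvDays
    (fun day _ hc => by
      unfold entryOptK
      rw [hoursStr_of_not_contains l day hc]
      rfl)]
  rfl

lemma ents_nil_iff : ∀ (slot : List (Option String)) (k : Int),
    ents k slot = [] ↔ slot.all (fun x => decide (x = none)) = true := by
  intro slot
  induction slot with
  | nil => intro k; simp [ents]
  | cons o rest ih =>
    intro k
    cases o with
    | none => simpa [ents] using ih (k + 1)
    | some s => simp [ents]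

-- bridging the port's pyRange/pyGetD boundary filters to the structural scans ----

lemma filter_cons' {α : Type} (p : α → Bool) (a : α) (l : List α) :
    List.filter p (a :: l) = (if p a = true then [a] else []) ++ List.filter p l := by
  rw [List.filter_cons]; split_ifs <;> simp

lemma bridge_starts (a0 a1 a2 a3 a4 a5 a6 : Option String) :
    (PySem.List.pyRange 0 7 1).filter (fun i => decide
      (PySem.List.pyGetD [a0,a1,a2,a3,a4,a5,a6] i none ≠ none ∧
        (i = 0 ∨ PySem.List.pyGetD [a0,a1,a2,a3,a4,a5,a6] i none ≠ PySem.List.pyGetD [a0,a1,a2,a3,a4,a5,a6] (i - 1) none)))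
    = dstarts 0 none [a0,a1,a2,a3,a4,a5,a6] := by
  rw [show PySem.List.pyRange 0 7 1 = [0,1,2,3,4,5,6] from by decide]
  simp only [filter_cons', List.filter_nil, decide_eq_true_eq]
  norm_num [PySem.List.pyGetD_ofNat', dstarts]

lemma bridge_ends (a0 a1 a2 a3 a4 a5 a6 : Option String) :
    (PySem.List.pyRange 0 7 1).filter (fun i => decide
      (PySem.List.pyGetD [a0,a1,a2,a3,a4,a5,a6] i none ≠ none ∧
        (i = 6 ∨ PySem.List.pyGetD [a0,a1,a2,a3,a4,a5,a6] i none ≠ PySem.List.pyGetD [a0,a1,a2,a3,a4,a5,a6] (i + 1) none)))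
    = dends 0 [a0,a1,a2,a3,a4,a5,a6] := by
  rw [show PySem.List.pyRange 0 7 1 = [0,1,2,3,4,5,6] from by decide]
  simp only [filter_cons', List.filter_nil, decide_eq_true_eq]
  norm_num [PySem.List.pyGetD_ofNat', dends]

-- ===== VERDICT (by name: the statement is the Claim_ definition above) =====
theorem format_logon_hours_spec : Claim_equal_format_logon_hours := by
  intro l _ hpre
  unfold Spec_format_logon_hours
  unfold format_logon_hours format_logon_hours_alt
  dsimp only
  rw [formatted_eq l hpre]
  have hkeys : ∀ k ∈ (PySem.Dict.ofList l).keys, k ∈ pvDays := by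
    intro k hk
    rcases List.mem_map.mp (mem_keys_ofList hk) with ⟨p, hp, rfl⟩
    exact hpre p hp
  have hmapeq :
      ((PySem.Dict.ofList l).items.foldl (fun sl kv =>
        if kv.2 ≠ [] then
          PySem.List.pySetD sl ((PySem.List.index? pvDays kv.1).getD 0 : Int)
            (some (pvHourStr kv.2))
        else sl)
        (List.replicate 7 (none : Option String)))
      = pvDays.map (fun day => hoursStr (PySem.Dict.ofList l) day) := by
    rw [PySem.Dict.items_eq_map_keys (PySem.Dict.ofList l) (PySem.Dict.nodup_keys_ofList l)
      ([] : List Int)]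
    rw [List.foldl_map]
    rw [show (List.replicate 7 (none : Option String)) = pvDays.map (fun _ => none) from rfl]
    rw [slot_fold (PySem.Dict.ofList l) (PySem.Dict.ofList l).keys (fun _ => none) hkeys]
    apply List.map_congr_left
    intro day _
    rw [← slot_item l day]
    exact if_congr (and_congr_left' (PySem.Dict.contains_iff_mem_keys _ _).symm) rfl rfl
  have hlit : pvDays.map (fun day => hoursStr (PySem.Dict.ofList l) day)
      = [hoursStr (PySem.Dict.ofList l) "M", hoursStr (PySem.Dict.ofList l) "Tu",
         hoursStr (PySem.Dict.ofList l) "W", hoursStr (PySem.Dict.ofList l) "Th",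
         hoursStr (PySem.Dict.ofList l) "F", hoursStr (PySem.Dict.ofList l) "Sa",
         hoursStr (PySem.Dict.ofList l) "Su"] := by
    simp [pvDays]
  rw [hmapeq, hlit]
  have hEe : entriesOf l
      = ents 0 [hoursStr (PySem.Dict.ofList l) "M", hoursStr (PySem.Dict.ofList l) "Tu",
         hoursStr (PySem.Dict.ofList l) "W", hoursStr (PySem.Dict.ofList l) "Th",
         hoursStr (PySem.Dict.ofList l) "F", hoursStr (PySem.Dict.ofList l) "Sa",
         hoursStr (PySem.Dict.ofList l) "Su"] := by
    rw [ents_eq l, hlit]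
  by_cases hE : entriesOf l = []
  · rw [hE]
    rw [if_pos (by simp)]
    rw [if_pos ((ents_nil_iff _ 0).mp (hEe.symm.trans hE))]
  · rw [if_neg (by simpa using hE)]
    rw [if_neg (fun hall => hE (hEe.trans ((ents_nil_iff _ 0).mpr hall)))]
    rw [consolidate_eq (entriesOf l).length (entriesOf l) le_rfl (valid_entries l)]
    rw [bridge_starts, bridge_ends]
    rw [dstarts_grp 7 _ 0 none (by simp)
      (fun o _ => by
        by_cases h : o = none
        · exact Or.inl h
        · exact Or.inr h)]
    rw [dends_grp 7 _ 0 (by simp)]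
    rw [List.zip_map', List.map_map]
    rw [hEe, groups_ents 7 _ 0 (by simp)]
    congr 1
    apply List.map_congr_left
    intro t ht
    obtain ⟨h0, hget⟩ := grp_val 7 _ 0 t (by simp) ht
    have hlt : (t.1 - 0).toNat < 7 := by
      by_contra hge
      rw [List.getElem?_eq_none (by simp only [List.length_cons, List.length_nil]; omega)] at hget
      exact absurd hget (by simp)
    have hval : PySem.List.pyGetD
        [hoursStr (PySem.Dict.ofList l) "M", hoursStr (PySem.Dict.ofList l) "Tu",
         hoursStr (PySem.Dict.ofList l) "W", hoursStr (PySem.Dict.ofList l) "Th",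
         hoursStr (PySem.Dict.ofList l) "F", hoursStr (PySem.Dict.ofList l) "Sa",
         hoursStr (PySem.Dict.ofList l) "Su"] t.1 none = some t.2.2 := by
      rw [show (t.1 - 0).toNat = t.1.toNat from by omega] at hget
      rw [show t.1 = ((t.1.toNat : Nat) : Int) from by omega, PySem.List.pyGetD_natCast]
      rw [List.getD_eq_getElem?_getD, hget]
      rfl
    simp only [Function.comp_apply, gFmt, hval, Option.getD_some]
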